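-- pv_equiv track=rewrite | github.com/HeoYou/algorism-python | LINE SW 5번.py | solution
-- ===== SOURCE A (Python) =====
-- def solution(dataSource, tags):
--     answer = []
--     doc_dic = { data[0] : 0 for data in dataSource }
--
--
--     for tag in tags:
--         for i in range(len(dataSource)):
--             for j in range(1, len(dataSource[i])):
--                 if tag == dataSource[i][j]:
--                     doc_dic[dataSource[i][0]] += 1
--
--     # answer = sorted(doc_dic.items(), key=lambda item: (item[1], item[0]), reverse = True)
--     answer = sorted(sorted(doc_dic.items(), key = lambda item : item[0]), key = lambda item : item[1], reverse = True)
--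
--     answer_lst = []
--     if len(answer) > 10:
--         for i in range(10):
--             if answer[i][1] != 0:
--                 answer_lst.append(answer[i][0])
--     else:
--         for i in range(len(answer)):
--             if answer[i][1] != 0:
--                 answer_lst.append(answer[i][0])
--
--
--     return answer_lst
-- ===== SOURCE B (Python) =====
-- def solution(dataSource, tags):
--     # Build an inverted index tag-value -> list of doc names (one entry per matching
--     # position), then score only the postings of each queried tag.
--     index = {}
--     scores = {}
--     for data in dataSource:
--         name = data[0]
--         scores[name] = 0
--         for v in data[1:]:
--             index.setdefault(v, []).append(name)
--     for tag in tags: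
--         for name in index.get(tag, []):
--             scores[name] += 1
--     ranked = sorted(sorted(scores.items(), key=lambda it: it[0]), key=lambda it: it[1], reverse=True)
--     return [name for name, cnt in ranked[:10] if cnt != 0]
-- ===== Notes on version B (the rewrite author's own statement) =====
-- stated objective: alternative
-- what changed: Replaces A's rescan of every document position for every tag (triple nested loop) with a one-pass inverted index (tag value -> doc-name postings) scored over only the queried tags' postings; selection becomes a single slice-and-filter comprehension. Intended as faster; a timing run read ~1.5x on dense inputs but could not confirm it consistently.
import Mathlib
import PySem

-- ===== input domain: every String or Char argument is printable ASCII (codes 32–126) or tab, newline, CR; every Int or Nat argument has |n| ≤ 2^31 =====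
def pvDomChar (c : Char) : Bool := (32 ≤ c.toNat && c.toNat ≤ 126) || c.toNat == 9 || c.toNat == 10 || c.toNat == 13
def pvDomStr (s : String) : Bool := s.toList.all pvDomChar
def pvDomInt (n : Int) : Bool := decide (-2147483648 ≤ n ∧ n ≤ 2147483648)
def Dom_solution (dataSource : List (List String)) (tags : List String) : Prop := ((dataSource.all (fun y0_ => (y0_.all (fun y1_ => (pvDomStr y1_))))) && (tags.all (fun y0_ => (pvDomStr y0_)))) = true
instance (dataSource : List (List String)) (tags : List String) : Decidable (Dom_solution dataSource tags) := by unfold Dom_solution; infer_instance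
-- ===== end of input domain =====

-- B replaces A's per-tag rescan of all documents with an inverted index (tag value -> doc-name
-- postings built in one pass) scored over only the queried tags' postings (objective: alternative).

-- ===== PORT A =====
def solution (dataSource : List (List String)) (tags : List String) : List String :=
  let doc_dic : PySem.Dict String Int :=
    dataSource.foldl (fun d data => d.insert (PySem.List.pyGetD data 0 "") 0) PySem.Dict.empty
  let doc_dic :=
    tags.foldl (fun d tag =>
      (PySem.List.pyRange 0 (PySem.List.len dataSource)).foldl (fun d i =>
        (PySem.List.pyRange 1 (PySem.List.len (PySem.List.pyGetD dataSource i []))).foldl (fun d j =>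
          if tag = PySem.List.pyGetD (PySem.List.pyGetD dataSource i []) j "" then
            d.modify (PySem.List.pyGetD (PySem.List.pyGetD dataSource i []) 0 "") 0 (· + 1)
          else d) d) d) doc_dic
  let answer :=
    PySem.List.sorted (PySem.List.sorted doc_dic.items (fun item => item.1)) (fun item => item.2) true
  let answer_lst : List String :=
    if answer.length > 10 then
      (PySem.List.pyRange 0 10).foldl (fun acc i =>
        if (PySem.List.pyGetD answer i ("", 0)).2 ≠ 0 then
          acc ++ [(PySem.List.pyGetD answer i ("", 0)).1]
        else acc) []
    else
      (PySem.List.pyRange 0 (PySem.List.len answer)).foldl (fun acc i =>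
        if (PySem.List.pyGetD answer i ("", 0)).2 ≠ 0 then
          acc ++ [(PySem.List.pyGetD answer i ("", 0)).1]
        else acc) []
  answer_lst

-- ===== PORT B =====
-- 'data[1:]' is ported as 'List.drop 1' and 'ranked[:10]' as 'List.take 10' (exact for these
-- nonnegative slices).
def solution_alt (dataSource : List (List String)) (tags : List String) : List String :=
  let p :=
    dataSource.foldl
      (fun (p : PySem.Dict String (List String) × PySem.Dict String Int) data =>
        let name := PySem.List.pyGetD data 0 ""
        ((data.drop 1).foldl (fun ix v => ix.modify v [] (· ++ [name])) p.1,
         p.2.insert name 0))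
      (PySem.Dict.empty, PySem.Dict.empty)
  let index := p.1
  let scores :=
    tags.foldl (fun sc tag =>
      (index.getD tag []).foldl (fun sc name => sc.modify name 0 (· + 1)) sc) p.2
  let ranked :=
    PySem.List.sorted (PySem.List.sorted scores.items (fun it => it.1)) (fun it => it.2) true
  ((ranked.take 10).filter (fun it => it.2 != 0)).map (fun it => it.1)

-- ===== PRECONDITION & SPEC =====
-- Pre_ excludes exactly the inputs with an empty inner list, on which Python A (and B) raises
-- IndexError at data[0].
def Pre_solution (dataSource : List (List String)) (tags : List String) : Prop :=
  ∀ row ∈ dataSource, row ≠ []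
instance (dataSource : List (List String)) (tags : List String) : Decidable (Pre_solution dataSource tags) := by unfold Pre_solution; infer_instance
def pvWitness_solution : List (List String) × List String :=
  ([["docA", "x"], ["docB", "x", "y"]], ["x", "y"])
def Spec_solution (dataSource : List (List String)) (tags : List String) (out : List String) : Prop := out = solution_alt dataSource tags
instance (dataSource : List (List String)) (tags : List String) (out : List String) : Decidable (Spec_solution dataSource tags out) := by unfold Spec_solution; infer_instance

-- ===== CLAIM (what is proved, stated in full; the proofs are below) =====
def Claim_equal_solution : Prop := ∀ (dataSource : List (List String)) (tags : List String), Dom_solution dataSource tags → Pre_solution dataSource tags → Spec_solution dataSource tags (solution dataSource tags)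

-- ===== LEMMAS AND PROOFS =====

-- lookup in the index after inserting one document's postings
theorem getD_buildRow (vs : List String) (ix : PySem.Dict String (List String)) (nm t : String) :
    (vs.foldl (fun ix v => ix.modify v [] (· ++ [nm])) ix).getD t []
      = ix.getD t [] ++ (vs.filter (fun v => v == t)).map (fun _ => nm) := by
  induction vs generalizing ix with
  | nil => simp
  | cons v rest ih =>
    simp only [List.foldl_cons, List.filter_cons]
    by_cases hv : v = t
    · subst hv
      simp [ih, PySem.Dict.getD_modify_self]
    · have : (v == t) = false := by simp [hv]
      simp [ih, this, PySem.Dict.getD_modify_of_ne _ _ _ (Ne.symm hv)]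

-- lookup in the fully built inverted index: concatenated per-row postings
theorem getD_index (ds : List (List String)) (ix : PySem.Dict String (List String)) (t : String) :
    (ds.foldl (fun ix data =>
        (data.drop 1).foldl (fun ix v => ix.modify v [] (· ++ [PySem.List.pyGetD data 0 ""])) ix) ix).getD t []
      = ix.getD t []
        ++ ds.flatMap (fun data =>
             ((data.drop 1).filter (fun v => v == t)).map (fun _ => PySem.List.pyGetD data 0 "")) := by
  induction ds generalizing ix with
  | nil => simp
  | cons data rest ih =>
    simp only [List.foldl_cons, List.flatMap_cons]
    rw [ih, getD_buildRow, List.append_assoc]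

-- per row: A's guarded scan of the tag positions is a fold over the row's matching values
theorem fold_filter_modify (tag nm : String) (vs : List String) (acc : PySem.Dict String Int) :
    vs.foldl (fun d v => if tag = v then d.modify nm 0 (· + 1) else d) acc
      = (vs.filter (fun v => v == tag)).foldl (fun d _ => d.modify nm 0 (· + 1)) acc := by
  induction vs generalizing acc with
  | nil => rfl
  | cons v rest ih =>
    simp only [List.foldl_cons, List.filter_cons]
    by_cases hv : tag = v
    · subst hv
      simp [ih]
    · have : (v == tag) = false := by simp [Ne.symm hv]
      simp [hv, this, ih]

-- one tag's worth of A's triple loop equals one walk over that tag's postings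
theorem step_eq (ds : List (List String)) (d : PySem.Dict String Int) (tag : String) :
    (PySem.List.pyRange 0 (PySem.List.len ds)).foldl (fun d i =>
        (PySem.List.pyRange 1 (PySem.List.len (PySem.List.pyGetD ds i []))).foldl (fun d j =>
          if tag = PySem.List.pyGetD (PySem.List.pyGetD ds i []) j "" then
            d.modify (PySem.List.pyGetD (PySem.List.pyGetD ds i []) 0 "") 0 (· + 1)
          else d) d) d
      = ((ds.foldl (fun ix data =>
            (data.drop 1).foldl (fun ix v => ix.modify v [] (· ++ [PySem.List.pyGetD data 0 ""])) ix)
            PySem.Dict.empty).getD tag []).foldl (fun d nm => d.modify nm 0 (· + 1)) d := by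
  rw [getD_index]
  have hempty : (PySem.Dict.empty : PySem.Dict String (List String)).getD tag [] = [] := rfl
  rw [hempty, List.nil_append, List.foldl_flatMap]
  rw [PySem.List.foldl_pyRange_pyGetD ds ([] : List String)
    (fun d data =>
      (PySem.List.pyRange 1 (PySem.List.len data)).foldl (fun d j =>
        if tag = PySem.List.pyGetD data j "" then
          d.modify (PySem.List.pyGetD data 0 "") 0 (· + 1)
        else d) d) d (by norm_num)]
  rw [show ((0 : Int).toNat) = 0 from rfl, List.drop_zero]
  apply PySem.List.foldl_congr_mem
  intro acc data _
  rw [PySem.List.foldl_pyRange_pyGetD data "" (fun d v =>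
      if tag = v then d.modify (PySem.List.pyGetD data 0 "") 0 (· + 1) else d) acc (by norm_num)]
  rw [show ((1 : Int).toNat) = 1 from rfl]
  rw [List.foldl_map]
  exact fold_filter_modify tag (PySem.List.pyGetD data 0 "") (data.drop 1) acc

-- (range k).map (getD ·) is take k
theorem map_getD_range_take {α : Type} (xs : List α) (d : α) (k : Nat) (h : k ≤ xs.length) :
    (List.range k).map (fun i => xs.getD i d) = xs.take k := by
  apply List.ext_getElem
  · simp [h]
  · intro i h1 h2
    simp only [List.getElem_map, List.getElem_range, List.getElem_take]
    rw [List.getD_eq_getElem]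

-- the shared tail: slice-to-10 then keep nonzero names
theorem select_eq (ans : List (String × Int)) :
    (if ans.length > 10 then
      (PySem.List.pyRange 0 10).foldl (fun acc i =>
        if (PySem.List.pyGetD ans i ("", 0)).2 ≠ 0 then
          acc ++ [(PySem.List.pyGetD ans i ("", 0)).1]
        else acc) []
    else
      (PySem.List.pyRange 0 (PySem.List.len ans)).foldl (fun acc i =>
        if (PySem.List.pyGetD ans i ("", 0)).2 ≠ 0 then
          acc ++ [(PySem.List.pyGetD ans i ("", 0)).1]
        else acc) [])
      = ((ans.take 10).filter (fun it => it.2 != 0)).map (fun it => it.1) := by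
  have hbody : ∀ (l : List (String × Int)),
      l.foldl (fun acc it => if it.2 ≠ 0 then acc ++ [it.1] else acc) ([] : List String)
        = (l.filter (fun it => it.2 != 0)).map (fun it => it.1) := by
    intro l
    rw [PySem.List.foldl_ite_eq_foldl_filter (fun (it : String × Int) => it.2 ≠ 0)
        (fun acc it => acc ++ [it.1])]
    rw [PySem.List.foldl_append_singleton_eq_map]
    simp only [List.nil_append, ne_eq, decide_not]
    rfl
  split_ifs with h
  · rw [show (10 : Int) = ((10 : Nat) : Int) from rfl, PySem.List.pyRange_zero_natCast 10,
      List.foldl_map]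
    simp only [PySem.List.pyGetD_natCast]
    have := hbody ((List.range 10).map (fun i => ans.getD i ("", 0)))
    rw [List.foldl_map] at this
    rw [this, map_getD_range_take ans ("", 0) 10 (by omega)]
  · rw [PySem.List.foldl_pyRange_pyGetD ans ("", 0)
      (fun acc it => if it.2 ≠ 0 then acc ++ [it.1] else acc) [] (by norm_num)]
    rw [show ((0 : Int).toNat) = 0 from rfl, List.drop_zero]
    rw [hbody, List.take_of_length_le (by omega)]

theorem solution_eq_alt (dataSource : List (List String)) (tags : List String) :
    solution dataSource tags = solution_alt dataSource tags := by
  simp only [solution, solution_alt]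
  rw [show (fun (p : PySem.Dict String (List String) × PySem.Dict String Int) (data : List String) =>
        let name := PySem.List.pyGetD data 0 ""
        ((data.drop 1).foldl (fun ix v => ix.modify v [] (· ++ [name])) p.1,
         p.2.insert name 0))
      = (fun (p : PySem.Dict String (List String) × PySem.Dict String Int) (data : List String) =>
          ((fun (ix : PySem.Dict String (List String)) (data : List String) =>
              (data.drop 1).foldl
                (fun ix v => ix.modify v [] (· ++ [PySem.List.pyGetD data 0 ""])) ix) p.1 data,
           (fun (sc : PySem.Dict String Int) (data : List String) =>
              PySem.Dict.insert sc (PySem.List.pyGetD data 0 "") 0) p.2 data)) from rfl]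
  rw [PySem.List.foldl_prod_mk
    (f := fun (ix : PySem.Dict String (List String)) (data : List String) =>
      (data.drop 1).foldl (fun ix v => ix.modify v [] (· ++ [PySem.List.pyGetD data 0 ""])) ix)
    (g := fun (sc : PySem.Dict String Int) (data : List String) =>
      PySem.Dict.insert sc (PySem.List.pyGetD data 0 "") 0)]
  simp only
  rw [select_eq]
  rw [PySem.List.foldl_congr_mem tags _ _
    (dataSource.foldl (fun d data => d.insert (PySem.List.pyGetD data 0 "") 0) PySem.Dict.empty)
    (fun acc tag _ => step_eq dataSource acc tag)]

-- ===== VERDICT (by name: the statement is the Claim_ definition above) =====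
theorem solution_spec : Claim_equal_solution := by
  intro dataSource tags _ _
  unfold Spec_solution
  exact solution_eq_alt dataSource tags
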